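-- pv_equiv track=rewrite | github.com/Aakanshakowerjani/Competitive-Programming | police and theif.py | polth
-- ===== SOURCE A (Python) =====
-- def polth(arr, n, k):
--     i = 0
--     l = 0
--     r = 0
--     res = 0
--     thi = []
--     pol = []
--
--     # store indices in list
--     while i < n:
--         if arr[i] == 'P':
--             pol.append(i)
--         elif arr[i] == 'T':
--             thi.append(i)
--         i += 1
--     while l < len(thi) and r < len(pol):
--
--         # can be caught
--         if (abs(thi[l] - pol[r]) <= k):
--             res += 1
--             l += 1
--             r += 1
--
--         # increment the minimum index
--         elif thi[l] < pol[r]: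
--             l += 1
--         else:
--             r += 1
--
--     return res
-- ===== SOURCE B (Python) =====
-- def polth(arr, n, k):
--     # single left-to-right pass keeping FIFO queues of unmatched police/thief indices
--     res = 0
--     thieves = []
--     police = []
--     for i in range(n):
--         while thieves and i - thieves[0] > k:
--             thieves.pop(0)
--         while police and i - police[0] > k:
--             police.pop(0)
--         c = arr[i]
--         if c == 'P':
--             if thieves:
--                 res += 1
--                 thieves.pop(0)
--             else:
--                 police.append(i)
--         elif c == 'T':
--             if police:
--                 res += 1
--                 police.pop(0)
--             else:
--                 thieves.append(i)
--     return res
-- ===== Notes on version B (the rewrite author's own statement) =====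
-- stated objective: alternative
-- what changed: Replaces A's two-phase algorithm (collect all police/thief indices into two lists, then a two-pointer merge) with a single left-to-right pass that maintains FIFO queues of unmatched police and thief indices, evicting fronts farther than k and matching the current character against the opposite queue.
import Mathlib
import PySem

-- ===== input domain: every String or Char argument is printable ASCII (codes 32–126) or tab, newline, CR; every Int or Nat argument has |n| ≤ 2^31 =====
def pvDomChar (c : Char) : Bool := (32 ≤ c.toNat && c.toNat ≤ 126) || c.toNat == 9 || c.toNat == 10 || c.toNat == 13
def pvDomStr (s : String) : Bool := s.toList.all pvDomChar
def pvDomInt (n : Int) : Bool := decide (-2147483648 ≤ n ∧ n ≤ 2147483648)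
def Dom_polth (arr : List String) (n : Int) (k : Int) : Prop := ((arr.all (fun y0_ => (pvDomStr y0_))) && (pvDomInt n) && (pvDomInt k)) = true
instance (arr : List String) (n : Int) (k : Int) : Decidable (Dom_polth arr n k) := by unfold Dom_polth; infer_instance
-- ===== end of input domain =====

-- B replaces A's collect-two-index-lists-then-two-pointer-merge with a single left-to-right
-- pass maintaining FIFO queues of unmatched police/thief indices (objective: alternative).

-- ===== PORT A =====
-- first while loop of A: collect thief/police indices for i in [i, n)
def polthScan (arr : List String) (n : Int) (i : Int) (thi pol : List Int) :
    List Int × List Int :=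
  if _h : i < n then
    match PySem.List.pyGet? arr i with
    | none => (thi, pol)  -- Python raises IndexError here (excluded by Pre_polth)
    | some c =>
      if c = "P" then polthScan arr n (i + 1) thi (pol ++ [i])
      else if c = "T" then polthScan arr n (i + 1) (thi ++ [i]) pol
      else polthScan arr n (i + 1) thi pol
  else (thi, pol)
termination_by (n - i).toNat
decreasing_by all_goals omega

-- second while loop of A: two-pointer merge of the index lists
def polthMerge (k : Int) (thi pol : List Int) (l r : Nat) (res : Int) : Int :=
  if _h : l < thi.length ∧ r < pol.length then
    if |thi.getD l 0 - pol.getD r 0| ≤ k then polthMerge k thi pol (l + 1) (r + 1) (res + 1)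
    else if thi.getD l 0 < pol.getD r 0 then polthMerge k thi pol (l + 1) r res
    else polthMerge k thi pol l (r + 1) res
  else res
termination_by (thi.length - l) + (pol.length - r)
decreasing_by all_goals omega

def polth (arr : List String) (n : Int) (k : Int) : Int :=
  let s := polthScan arr n 0 [] []
  polthMerge k s.1 s.2 0 0 0

-- ===== PORT B =====
-- B's inner while loops: pop stale indices (distance to i exceeds k) off the queue front
def dropStale (k i : Int) : List Int → List Int
  | [] => []
  | f :: rest => if i - f > k then dropStale k i rest else f :: rest

def polthAltGo (arr : List String) (n k : Int) (i : Int) (res : Int) (tq pq : List Int) : Int :=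
  if _h : i < n then
    let tq' := dropStale k i tq
    let pq' := dropStale k i pq
    match PySem.List.pyGet? arr i with
    | none => res  -- Python raises IndexError here (excluded by Pre_polth)
    | some c =>
      if c = "P" then
        match tq' with
        | _ :: rest => polthAltGo arr n k (i + 1) (res + 1) rest pq'
        | [] => polthAltGo arr n k (i + 1) res tq' (pq' ++ [i])
      else if c = "T" then
        match pq' with
        | _ :: rest => polthAltGo arr n k (i + 1) (res + 1) tq' rest
        | [] => polthAltGo arr n k (i + 1) res (tq' ++ [i]) pq'
      else polthAltGo arr n k (i + 1) res tq' pq'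
  else res
termination_by (n - i).toNat
decreasing_by all_goals omega

def polth_alt (arr : List String) (n : Int) (k : Int) : Int :=
  polthAltGo arr n k 0 0 [] []

-- ===== PRECONDITION & SPEC =====
-- Pre_ excludes exactly n > len(arr), where the Python A raises IndexError.
def Pre_polth (arr : List String) (n : Int) (k : Int) : Prop := n ≤ (arr.length : Int)
instance (arr : List String) (n : Int) (k : Int) : Decidable (Pre_polth arr n k) := by
  unfold Pre_polth; infer_instance

def pvWitness_polth : List String × Int × Int := (["P", "X", "T", "T", "P"], 5, 2)

def Spec_polth (arr : List String) (n : Int) (k : Int) (out : Int) : Prop := out = polth_alt arr n k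
instance (arr : List String) (n : Int) (k : Int) (out : Int) : Decidable (Spec_polth arr n k out) := by
  unfold Spec_polth; infer_instance

-- ===== CLAIM (what is proved, stated in full; the proofs are below) =====
def Claim_equal_polth : Prop := ∀ (arr : List String) (n : Int) (k : Int),
  Dom_polth arr n k → Pre_polth arr n k → Spec_polth arr n k (polth arr n k)

-- ===== LEMMAS AND PROOFS =====

-- reference merge count on the raw index lists
def mrg (k : Int) : List Int → List Int → Int
  | [], _ => 0
  | _ :: _, [] => 0
  | t :: ts, p :: ps =>
    if |t - p| ≤ k then 1 + mrg k ts ps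
    else if t < p then mrg k ts (p :: ps)
    else mrg k (t :: ts) ps
termination_by a b => a.length + b.length
decreasing_by all_goals (simp only [List.length_cons]; omega)

theorem mrg_nil_left (k : Int) (ps : List Int) : mrg k [] ps = 0 := by
  rw [mrg]

theorem mrg_nil_right (k : Int) (ts : List Int) : mrg k ts [] = 0 := by
  cases ts <;> rw [mrg]

theorem mrg_cons_cons (k t p : Int) (ts ps : List Int) :
    mrg k (t :: ts) (p :: ps)
      = if |t - p| ≤ k then 1 + mrg k ts ps
        else if t < p then mrg k ts (p :: ps) else mrg k (t :: ts) ps := by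
  rw [mrg]

theorem polthMerge_eq_mrg (k : Int) (thi pol : List Int) (l r : Nat) (res : Int) :
    polthMerge k thi pol l r res = res + mrg k (thi.drop l) (pol.drop r) := by
  fun_induction polthMerge k thi pol l r res with
  | case1 l r res h h1 ih =>
    rw [List.drop_eq_getElem_cons h.1, List.drop_eq_getElem_cons h.2, mrg]
    simp only [List.getD_eq_getElem _ _ h.1, List.getD_eq_getElem _ _ h.2] at h1
    rw [if_pos h1, ih]; omega
  | case2 l r res h h1 h2 ih =>
    rw [List.drop_eq_getElem_cons h.1, List.drop_eq_getElem_cons h.2, mrg]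
    simp only [List.getD_eq_getElem _ _ h.1, List.getD_eq_getElem _ _ h.2] at h1 h2
    rw [if_neg h1, if_pos h2, ih, ← List.drop_eq_getElem_cons h.2]
  | case3 l r res h h1 h2 ih =>
    rw [List.drop_eq_getElem_cons h.1, List.drop_eq_getElem_cons h.2, mrg]
    simp only [List.getD_eq_getElem _ _ h.1, List.getD_eq_getElem _ _ h.2] at h1 h2
    rw [if_neg h1, if_neg h2, ih, ← List.drop_eq_getElem_cons h.1]
  | case4 l r res h =>
    rcases Nat.lt_or_ge l thi.length with hl | hl
    · have hr : pol.length ≤ r := by omega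
      rw [List.drop_of_length_le hr, mrg_nil_right]; omega
    · rw [List.drop_of_length_le hl, mrg_nil_left]; omega

-- the pair (thief indices, police indices) contributed by positions [i, n)
def tsps (arr : List String) (n i : Int) : List Int × List Int :=
  if _h : i < n then
    match PySem.List.pyGet? arr i with
    | none => ([], [])
    | some c =>
      if c = "P" then ((tsps arr n (i + 1)).1, i :: (tsps arr n (i + 1)).2)
      else if c = "T" then (i :: (tsps arr n (i + 1)).1, (tsps arr n (i + 1)).2)
      else tsps arr n (i + 1)
  else ([], [])
termination_by (n - i).toNat
decreasing_by all_goals omega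

theorem polthScan_eq_tsps (arr : List String) (n : Int) :
    ∀ (m : Nat) (i : Int), (n - i).toNat ≤ m → ∀ thi pol,
      polthScan arr n i thi pol = (thi ++ (tsps arr n i).1, pol ++ (tsps arr n i).2) := by
  intro m
  induction m with
  | zero =>
    intro i hm thi pol
    have hni : ¬ i < n := by omega
    rw [polthScan, tsps]
    simp [hni]
  | succ m ih =>
    intro i hm thi pol
    by_cases hin : i < n
    · have hm' : (n - (i + 1)).toNat ≤ m := by omega
      cases hg : PySem.List.pyGet? arr i with
      | none =>
        rw [polthScan, tsps]
        simp [hin, hg]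
      | some c =>
        by_cases hP : c = "P"
        · have hstep : polthScan arr n i thi pol = polthScan arr n (i + 1) thi (pol ++ [i]) := by
            rw [polthScan]; simp [hin, hg, hP]
          have hts : tsps arr n i = ((tsps arr n (i + 1)).1, i :: (tsps arr n (i + 1)).2) := by
            rw [tsps]; simp [hin, hg, hP]
          rw [hstep, ih (i + 1) hm', hts]
          simp
        · by_cases hT : c = "T"
          · have hstep : polthScan arr n i thi pol = polthScan arr n (i + 1) (thi ++ [i]) pol := by
              rw [polthScan]; simp [hin, hg, hP, hT]
            have hts : tsps arr n i = (i :: (tsps arr n (i + 1)).1, (tsps arr n (i + 1)).2) := by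
              rw [tsps]; simp [hin, hg, hP, hT]
            rw [hstep, ih (i + 1) hm', hts]
            simp
          · have hstep : polthScan arr n i thi pol = polthScan arr n (i + 1) thi pol := by
              rw [polthScan]; simp [hin, hg, hP, hT]
            have hts : tsps arr n i = tsps arr n (i + 1) := by
              rw [tsps]; simp [hin, hg, hP, hT]
            rw [hstep, ih (i + 1) hm', hts]
    · rw [polthScan, tsps]
      simp [hin]
theorem tsps_ge (arr : List String) (n : Int) :
    ∀ (m : Nat) (i : Int), (n - i).toNat ≤ m →
      (∀ x ∈ (tsps arr n i).1, i ≤ x) ∧ (∀ x ∈ (tsps arr n i).2, i ≤ x) := by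
  intro m
  induction m with
  | zero =>
    intro i hm
    have hni : ¬ i < n := by omega
    rw [tsps]; simp [hni]
  | succ m ih =>
    intro i hm
    by_cases hin : i < n
    · have hm' : (n - (i + 1)).toNat ≤ m := by omega
      obtain ⟨ihT, ihP⟩ := ih (i + 1) hm'
      cases hg : PySem.List.pyGet? arr i with
      | none => rw [tsps]; simp [hin, hg]
      | some c =>
        by_cases hP : c = "P"
        · have hts : tsps arr n i = ((tsps arr n (i + 1)).1, i :: (tsps arr n (i + 1)).2) := by
            rw [tsps]; simp [hin, hg, hP]
          rw [hts]
          refine ⟨fun x hx => by have := ihT x hx; omega, fun x hx => ?_⟩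
          simp only [List.mem_cons] at hx
          rcases hx with h | h
          · omega
          · have := ihP x h; omega
        · by_cases hT : c = "T"
          · have hts : tsps arr n i = (i :: (tsps arr n (i + 1)).1, (tsps arr n (i + 1)).2) := by
              rw [tsps]; simp [hin, hg, hP, hT]
            rw [hts]
            refine ⟨fun x hx => ?_, fun x hx => by have := ihP x hx; omega⟩
            simp only [List.mem_cons] at hx
            rcases hx with h | h
            · omega
            · have := ihT x h; omega
          · have hts : tsps arr n i = tsps arr n (i + 1) := by
              rw [tsps]; simp [hin, hg, hP, hT]
            rw [hts]
            exact ⟨fun x hx => by have := ihT x hx; omega,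
                   fun x hx => by have := ihP x hx; omega⟩
    · rw [tsps]; simp [hin]
theorem mem_dropStale {k i : Int} {q : List Int} {x : Int} (h : x ∈ dropStale k i q) : x ∈ q := by
  induction q with
  | nil => simpa [dropStale] using h
  | cons f rest ih =>
    rw [dropStale] at h
    split at h
    · exact List.mem_cons_of_mem _ (ih h)
    · exact h

theorem dropStale_head_fresh {k i t : Int} {q rest : List Int}
    (h : dropStale k i q = t :: rest) : i - t ≤ k := by
  induction q with
  | nil => simp [dropStale] at h
  | cons f q' ih =>
    rw [dropStale] at h
    split at h
    · exact ih h
    · cases h; omega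

-- dropping a stale police front does not change the merge count (thieves all ≥ i)
theorem mrg_dropStale_pol (k i : Int) (ts : List Int) (hts : ∀ x ∈ ts, i ≤ x) :
    ∀ (pq suffix : List Int), (∀ e ∈ pq, e < i) →
      mrg k ts (dropStale k i pq ++ suffix) = mrg k ts (pq ++ suffix) := by
  intro pq
  induction pq with
  | nil => intro suffix _; rw [dropStale]
  | cons p rest ih =>
    intro suffix hlt
    rw [dropStale]
    split
    · rw [ih suffix (fun e he => hlt e (List.mem_cons_of_mem _ he))]
      cases ts with
      | nil => rw [mrg_nil_left, mrg_nil_left]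
      | cons t ts' =>
        have hti : i ≤ t := hts t List.mem_cons_self
        have hpi : p < i := hlt p List.mem_cons_self
        rw [List.cons_append, mrg, if_neg (by rw [abs_le]; omega), if_neg (by omega)]
    · rfl

-- dropping a stale thief front does not change the merge count (police all ≥ i)
theorem mrg_dropStale_thi (k i : Int) (ps : List Int) (hps : ∀ x ∈ ps, i ≤ x) :
    ∀ (tq suffix : List Int), (∀ e ∈ tq, e < i) →
      mrg k (dropStale k i tq ++ suffix) ps = mrg k (tq ++ suffix) ps := by
  intro tq
  induction tq with
  | nil => intro suffix _; rw [dropStale]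
  | cons t rest ih =>
    intro suffix hlt
    rw [dropStale]
    split
    · rw [ih suffix (fun e he => hlt e (List.mem_cons_of_mem _ he))]
      cases ps with
      | nil => rw [mrg_nil_right, mrg_nil_right]
      | cons p ps' =>
        have hpi : i ≤ p := hps p List.mem_cons_self
        have hti : t < i := hlt t List.mem_cons_self
        rw [List.cons_append, mrg, if_neg (by rw [abs_le]; omega), if_pos (by omega)]
    · rfl

theorem polthAltGo_eq_mrg (arr : List String) (n k : Int) :
    ∀ (m : Nat) (i : Int), (n - i).toNat ≤ m → ∀ (res : Int) (tq pq : List Int),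
      (∀ e ∈ tq, e < i) → (∀ e ∈ pq, e < i) → (tq = [] ∨ pq = []) →
      polthAltGo arr n k i res tq pq
        = res + mrg k (tq ++ (tsps arr n i).1) (pq ++ (tsps arr n i).2) := by
  intro m
  induction m with
  | zero =>
    intro i hm res tq pq _ _ hone
    have hin : ¬ i < n := by omega
    rw [polthAltGo, tsps]
    simp only [hin, dif_neg, not_false_iff, dite_false, List.append_nil]
    rcases hone with h | h <;> subst h
    · rw [mrg_nil_left]; omega
    · rw [mrg_nil_right]; omega
  | succ m ih =>
    intro i hm res tq pq htq hpq hone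
    by_cases hin : i < n
    · have hm' : (n - (i + 1)).toNat ≤ m := by omega
      obtain ⟨hTge, hPge⟩ := tsps_ge arr n (m + 1) i hm
      have hev : mrg k (tq ++ (tsps arr n i).1) (pq ++ (tsps arr n i).2)
          = mrg k (dropStale k i tq ++ (tsps arr n i).1)
                  (dropStale k i pq ++ (tsps arr n i).2) := by
        rcases hone with h | h <;> subst h
        · rw [dropStale]
          simp only [List.nil_append]
          rw [mrg_dropStale_pol k i (tsps arr n i).1 hTge pq (tsps arr n i).2 hpq]
        · rw [dropStale]
          simp only [List.nil_append]
          rw [mrg_dropStale_thi k i (tsps arr n i).2 hPge tq (tsps arr n i).1 htq]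
      have htq' : ∀ e ∈ dropStale k i tq, e < i := fun e he => htq e (mem_dropStale he)
      have hpq' : ∀ e ∈ dropStale k i pq, e < i := fun e he => hpq e (mem_dropStale he)
      have hone' : dropStale k i tq = [] ∨ dropStale k i pq = [] := by
        rcases hone with h | h <;> subst h
        · left; rw [dropStale]
        · right; rw [dropStale]
      cases hg : PySem.List.pyGet? arr i with
      | none =>
        have hts : tsps arr n i = ([], []) := by rw [tsps]; simp [hin, hg]
        have hL : polthAltGo arr n k i res tq pq = res := by
          rw [polthAltGo]; simp [hin, hg]
        rw [hL, hev, hts]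
        simp only [List.append_nil]
        rcases hone' with h | h <;> rw [h]
        · rw [mrg_nil_left]; omega
        · rw [mrg_nil_right]; omega
      | some c =>
        by_cases hP : c = "P"
        · have hts : tsps arr n i = ((tsps arr n (i + 1)).1, i :: (tsps arr n (i + 1)).2) := by
            rw [tsps]; simp [hin, hg, hP]
          cases htq'' : dropStale k i tq with
          | cons t rest =>
            have hpqnil : pq = [] := by
              rcases hone with h | h
              · exfalso; rw [h, dropStale] at htq''; cases htq''
              · exact h
            subst hpqnil
            have hpq'nil : dropStale k i ([] : List Int) = [] := by rw [dropStale]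
            have hL : polthAltGo arr n k i res tq []
                = polthAltGo arr n k (i + 1) (res + 1) rest [] := by
              rw [polthAltGo]; simp [hin, hg, hP, htq'', hpq'nil]
            rw [hL, ih (i + 1) hm' (res + 1) rest []
              (fun e he => by have := htq' e (htq'' ▸ List.mem_cons_of_mem _ he); omega)
              (fun e he => by cases he) (Or.inr rfl)]
            rw [hev, htq'', hpq'nil, hts]
            have hfresh : i - t ≤ k := dropStale_head_fresh htq''
            have hti : t < i := htq' t (htq'' ▸ List.mem_cons_self)
            have hcond : |t - i| ≤ k := by rw [abs_le]; omega
            simp only [List.cons_append, List.nil_append]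
            rw [mrg_cons_cons, if_pos hcond]
            omega
          | nil =>
            have hL : polthAltGo arr n k i res tq pq
                = polthAltGo arr n k (i + 1) res [] (dropStale k i pq ++ [i]) := by
              rw [polthAltGo]; simp [hin, hg, hP, htq'']
            rw [hL, ih (i + 1) hm' res [] (dropStale k i pq ++ [i])
              (fun e he => by cases he)
              (fun e he => by
                rcases List.mem_append.mp he with h | h
                · have := hpq' e h; omega
                · simp only [List.mem_singleton] at h; omega)
              (Or.inl rfl)]
            rw [hev, htq'', hts]
            simp only [List.nil_append, List.append_assoc, List.cons_append, List.singleton_append]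
        · by_cases hT : c = "T"
          · have hts : tsps arr n i = (i :: (tsps arr n (i + 1)).1, (tsps arr n (i + 1)).2) := by
              rw [tsps]; simp [hin, hg, hP, hT]
            cases hpq'' : dropStale k i pq with
            | cons p rest =>
              have htqnil : tq = [] := by
                rcases hone with h | h
                · exact h
                · exfalso; rw [h, dropStale] at hpq''; cases hpq''
              subst htqnil
              have htq'nil : dropStale k i ([] : List Int) = [] := by rw [dropStale]
              have hL : polthAltGo arr n k i res [] pq
                  = polthAltGo arr n k (i + 1) (res + 1) [] rest := by
                rw [polthAltGo]; simp [hin, hg, hP, hT, hpq'', htq'nil]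
              rw [hL, ih (i + 1) hm' (res + 1) [] rest
                (fun e he => by cases he)
                (fun e he => by have := hpq' e (hpq'' ▸ List.mem_cons_of_mem _ he); omega)
                (Or.inl rfl)]
              rw [hev, hpq'', htq'nil, hts]
              have hfresh : i - p ≤ k := dropStale_head_fresh hpq''
              have hpi : p < i := hpq' p (hpq'' ▸ List.mem_cons_self)
              have hcond : |i - p| ≤ k := by rw [abs_le]; omega
              simp only [List.cons_append, List.nil_append]
              rw [mrg_cons_cons, if_pos hcond]
              omega
            | nil =>
              have hL : polthAltGo arr n k i res tq pq
                  = polthAltGo arr n k (i + 1) res (dropStale k i tq ++ [i]) [] := by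
                rw [polthAltGo]; simp [hin, hg, hP, hT, hpq'']
              rw [hL, ih (i + 1) hm' res (dropStale k i tq ++ [i]) []
                (fun e he => by
                  rcases List.mem_append.mp he with h | h
                  · have := htq' e h; omega
                  · simp only [List.mem_singleton] at h; omega)
                (fun e he => by cases he)
                (Or.inr rfl)]
              rw [hev, hpq'', hts]
              simp only [List.nil_append, List.append_assoc, List.cons_append, List.singleton_append]
          · have hts : tsps arr n i = tsps arr n (i + 1) := by
              rw [tsps]; simp [hin, hg, hP, hT]
            have hL : polthAltGo arr n k i res tq pq
                = polthAltGo arr n k (i + 1) res (dropStale k i tq) (dropStale k i pq) := by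
              rw [polthAltGo]; simp [hin, hg, hP, hT]
            rw [hL, ih (i + 1) hm' res (dropStale k i tq) (dropStale k i pq)
              (fun e he => by have := htq' e he; omega)
              (fun e he => by have := hpq' e he; omega)
              hone']
            rw [hev, hts]
    · have hts : tsps arr n i = ([], []) := by rw [tsps]; simp [hin]
      have hL : polthAltGo arr n k i res tq pq = res := by rw [polthAltGo]; simp [hin]
      rw [hL, hts]
      simp only [List.append_nil]
      rcases hone with h | h <;> subst h
      · rw [mrg_nil_left]; omega
      · rw [mrg_nil_right]; omega
-- ===== VERDICT (by name: the statement is the Claim_ definition above) =====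
theorem polth_spec : Claim_equal_polth := by
  intro arr n k _hdom _hpre
  unfold Spec_polth polth polth_alt
  rw [polthMerge_eq_mrg]
  rw [polthScan_eq_tsps arr n (n - 0).toNat 0 (by omega) [] []]
  rw [polthAltGo_eq_mrg arr n k (n - 0).toNat 0 (by omega) 0 [] []
    (fun e he => by cases he) (fun e he => by cases he) (Or.inl rfl)]
  simp
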